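-- pv_equiv track=rewrite | github.com/reisenx/2110101-COM-PROG | 09-Nested-Structure/09_MoreDC_34/09_MoreDC_34.py | pattern3
-- ===== SOURCE A (Python) =====
-- def pattern3(N):
--     # Set initial number as 1
--     num = 1
--     # Create N x N matrix
--     matrix = []
--     for i in range(N):
--         # Add 0 before adding a number
--         row = [0]*i
--         # Add number after 0
--         for j in range(i,N):
--             row.append(num)
--             num += 1
--         # Add each row to a matrix
--         matrix.append(row)
--     return matrix
-- ===== SOURCE B (Python) =====
-- def pattern3(N):
--     # Each row i starts at 1 + i*N - i*(i-1)//2 (cells filled before row i); no running counter.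
--     return [[0] * i + list(range(1 + i * N - i * (i - 1) // 2,
--                                  1 + i * N - i * (i - 1) // 2 + (N - i)))
--             for i in range(N)]
-- ===== Notes on version B (the rewrite author's own statement) =====
-- stated objective: simpler
-- what changed: Replaces the threaded mutable counter and inner append loop with a single comprehension whose row values come from a closed-form start index 1 + i*N - i*(i-1)//2 and a range().
import Mathlib
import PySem

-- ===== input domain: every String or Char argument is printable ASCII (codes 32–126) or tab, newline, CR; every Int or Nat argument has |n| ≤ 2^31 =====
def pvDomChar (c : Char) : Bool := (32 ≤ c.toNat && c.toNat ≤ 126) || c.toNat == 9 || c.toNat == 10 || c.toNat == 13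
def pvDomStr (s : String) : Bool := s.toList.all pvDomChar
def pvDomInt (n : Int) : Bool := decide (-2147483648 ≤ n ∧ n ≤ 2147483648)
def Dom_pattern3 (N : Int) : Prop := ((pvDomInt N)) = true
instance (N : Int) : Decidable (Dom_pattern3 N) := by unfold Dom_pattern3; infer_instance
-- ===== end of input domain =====

-- B replaces A's threaded counter with a closed-form start per row; same quadratic cost, simpler decomposition.

-- ===== PORT A =====
def pattern3 (N : Int) : List (List Int) :=
  -- num = 1; matrix = []; for i in range(N): row = [0]*i; for j in range(i,N): row.append(num); num += 1; matrix.append(row)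
  let res := (PySem.List.pyRange 0 N 1).foldl
    (fun (st : Int × List (List Int)) i =>
      let inner := (PySem.List.pyRange i N 1).foldl
        (fun (p : List Int × Int) _ => (p.1 ++ [p.2], p.2 + 1))
        (List.replicate i.toNat 0, st.1)
      (inner.2, st.2 ++ [inner.1]))
    (1, [])
  res.2

-- ===== PORT B =====
def pattern3_alt (N : Int) : List (List Int) :=
  (PySem.List.pyRange 0 N 1).map (fun i =>
    let start := 1 + i * N - PySem.Int.floordiv (i * (i - 1)) 2
    List.replicate i.toNat 0 ++ PySem.List.pyRange start (start + (N - i)) 1)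

-- ===== PRECONDITION & SPEC =====
def Spec_pattern3 (N : Int) (out : List (List Int)) : Prop := out = pattern3_alt N
instance (N : Int) (out : List (List Int)) : Decidable (Spec_pattern3 N out) := by unfold Spec_pattern3; infer_instance

-- ===== CLAIM (what is proved, stated in full; the proofs are below) =====
def Claim_equal_pattern3 : Prop := ∀ (N : Int), Dom_pattern3 N → Spec_pattern3 N (pattern3 N)

-- ===== LEMMAS AND PROOFS =====

-- closed-form start of row i
def pvStart (i N : Int) : Int := 1 + i * N - PySem.Int.floordiv (i * (i - 1)) 2

-- the inner append loop only uses the length of the range it folds over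
theorem pv_inner_fold (l : List Int) (row : List Int) (num : Int) :
    l.foldl (fun (p : List Int × Int) _ => (p.1 ++ [p.2], p.2 + 1)) (row, num)
      = (row ++ PySem.List.pyRange num (num + l.length) 1, num + l.length) := by
  induction l generalizing row num with
  | nil => simp
  | cons a t ih =>
      simp only [List.foldl_cons, ih, List.length_cons]
      have he : (num + ((t.length + 1 : Nat) : Int)) = num + 1 + t.length := by push_cast; ring
      rw [he, PySem.List.pyRange_one_cons (by omega : num < num + 1 + (t.length : Int))]
      simp

theorem pv_start_succ (i N : Int) (_h : i < N) :
    pvStart i N + (N - i) = pvStart (i + 1) N := by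
  unfold pvStart
  rw [PySem.Int.floordiv_eq_ediv_of_pos (by omega), PySem.Int.floordiv_eq_ediv_of_pos (by omega)]
  have : (i + 1) * (i + 1 - 1) = i * (i - 1) + i * 2 := by ring
  rw [this, Int.add_mul_ediv_right _ _ (by omega : (2:Int) ≠ 0)]
  ring

-- the outer loop body of port A, named for the proofs (definitionally equal to the inline lambda)
def pvStepA (N : Int) (st : Int × List (List Int)) (i : Int) : Int × List (List Int) :=
  let inner := (PySem.List.pyRange i N 1).foldl
    (fun (p : List Int × Int) _ => (p.1 ++ [p.2], p.2 + 1))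
    (List.replicate i.toNat 0, st.1)
  (inner.2, st.2 ++ [inner.1])

theorem pv_outer (N : Int) (k : Nat) (i : Int) (hk : (N - i).toNat = k) (h0 : 0 ≤ i)
    (acc : List (List Int)) :
    ((PySem.List.pyRange i N 1).foldl (pvStepA N) (pvStart i N, acc)).2
      = acc ++ (PySem.List.pyRange i N 1).map (fun i =>
          List.replicate i.toNat 0 ++ PySem.List.pyRange (pvStart i N) (pvStart i N + (N - i)) 1) := by
  induction k generalizing i acc with
  | zero =>
      rw [PySem.List.pyRange_one_eq_nil (by omega)]
      simp
  | succ k ih =>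
      have hiN : i < N := by omega
      have hlen : ((PySem.List.pyRange i N 1).length : Int) = N - i := by
        rw [PySem.List.length_pyRange_one]; omega
      have hstep : pvStepA N (pvStart i N, acc) i
          = (pvStart (i + 1) N,
             acc ++ [List.replicate i.toNat 0 ++
               PySem.List.pyRange (pvStart i N) (pvStart i N + (N - i)) 1]) := by
        unfold pvStepA
        simp only [pv_inner_fold]
        rw [hlen, pv_start_succ i N hiN]
      rw [PySem.List.pyRange_one_cons hiN, List.foldl_cons, hstep,
        ih (i + 1) (by omega) (by omega)]
      simp

theorem pattern3_spec_aux (N : Int) : pattern3 N = pattern3_alt N := by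
  by_cases h : 0 < N
  · have h1 : pvStart 0 N = 1 := by
      unfold pvStart
      rw [PySem.Int.floordiv_eq_ediv_of_pos (by omega)]
      norm_num
    have hmain := pv_outer N (N - 0).toNat 0 rfl (le_refl 0) []
    rw [h1] at hmain
    show ((PySem.List.pyRange 0 N 1).foldl (pvStepA N) (1, [])).2 = _
    rw [hmain]
    simp [pattern3_alt, pvStart]
  · unfold pattern3 pattern3_alt
    rw [PySem.List.pyRange_one_eq_nil (by omega)]
    simp

-- ===== VERDICT (by name: the statement is the Claim_ definition above) =====
theorem pattern3_spec : Claim_equal_pattern3 := by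
  intro N _
  exact pattern3_spec_aux N
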